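-- pv_equiv track=rewrite | github.com/felmhorst/minecraft-ai-model | scripts/palette/generate_global_palette.py | get_runtime_variants
-- ===== SOURCE A (Python) =====
-- def can_be_powered(block_type):
--     return block_type.endswith(('_door', '_trapdoor'))
--
-- def can_be_waterlogged(block_type):
--     return block_type.endswith(('_bars', '_fence', '_ladder', '_pane', '_slab', '_stairs', '_trapdoor', '_wall', '_wall_sign'))
--
-- def get_runtime_variants(block_type, block):
--     runtime_variants = [block]
--
--     if can_be_powered(block_type):
--         variants_to_process = runtime_variants.copy()
--         runtime_variants = []
--         for variant in variants_to_process: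
--             base = variant[:-1] if variant.endswith(']') else variant
--             runtime_variants.append(f'{base},powered=true]')
--             runtime_variants.append(f'{base},powered=false]')
--
--     if can_be_waterlogged(block_type):
--         variants_to_process = runtime_variants.copy()
--         runtime_variants = []
--         for variant in variants_to_process:
--             base = variant[:-1] if variant.endswith(']') else variant
--             runtime_variants.append(f'{base},waterlogged=true]')
--             runtime_variants.append(f'{base},waterlogged=false]')
--
--     return runtime_variants
-- ===== SOURCE B (Python) =====
-- def can_be_powered(block_type):
--     return block_type.endswith(('_door', '_trapdoor'))
--
-- def can_be_waterlogged(block_type):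
--     return block_type.endswith(('_bars', '_fence', '_ladder', '_pane', '_slab', '_stairs', '_trapdoor', '_wall', '_wall_sign'))
--
-- def _bool_combos(n):
--     # itertools.product([True, False], repeat=n) order, without the import
--     if n == 0:
--         return [[]]
--     return [[b] + rest for b in (True, False) for rest in _bool_combos(n - 1)]
--
-- def get_runtime_variants(block_type, block):
--     props = []
--     if can_be_powered(block_type):
--         props.append('powered')
--     if can_be_waterlogged(block_type):
--         props.append('waterlogged')
--     if not props:
--         return [block]
--     base = block[:-1] if block.endswith(']') else block
--     return [base + ''.join(f',{p}={"true" if v else "false"}' for p, v in zip(props, combo)) + ']'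
--             for combo in _bool_combos(len(props))]
-- ===== Notes on version B (the rewrite author's own statement) =====
-- stated objective: simpler
-- what changed: B collects the active property names once, strips the closing ']' from the block once, and builds all variants in a single comprehension over the boolean cartesian product, instead of A's repeated copy-the-list / strip-each-variant / re-expand passes.
import Mathlib
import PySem

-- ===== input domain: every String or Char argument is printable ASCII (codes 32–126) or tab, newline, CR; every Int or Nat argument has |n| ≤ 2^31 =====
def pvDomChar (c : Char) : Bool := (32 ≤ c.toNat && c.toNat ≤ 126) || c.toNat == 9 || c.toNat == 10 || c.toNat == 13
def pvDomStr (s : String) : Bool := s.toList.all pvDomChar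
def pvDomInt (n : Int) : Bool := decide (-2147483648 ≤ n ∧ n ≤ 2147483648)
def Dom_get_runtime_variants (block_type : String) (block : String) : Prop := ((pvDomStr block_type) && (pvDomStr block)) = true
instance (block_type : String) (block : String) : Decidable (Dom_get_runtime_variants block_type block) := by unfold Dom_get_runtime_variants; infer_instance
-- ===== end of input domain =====

-- B builds the variant list in one pass over the cartesian product of the active properties
-- instead of A's repeated copy-strip-and-expand passes (objective: simpler; same asymptotic cost).

-- ===== PORT A =====
def can_be_powered (block_type : String) : Bool :=
  PySem.Str.endswith block_type "_door" || PySem.Str.endswith block_type "_trapdoor"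

def can_be_waterlogged (block_type : String) : Bool :=
  PySem.Str.endswith block_type "_bars" || PySem.Str.endswith block_type "_fence" ||
  PySem.Str.endswith block_type "_ladder" || PySem.Str.endswith block_type "_pane" ||
  PySem.Str.endswith block_type "_slab" || PySem.Str.endswith block_type "_stairs" ||
  PySem.Str.endswith block_type "_trapdoor" || PySem.Str.endswith block_type "_wall" ||
  PySem.Str.endswith block_type "_wall_sign"

def get_runtime_variants (block_type : String) (block : String) : List String :=
  let runtime_variants := [block]
  let runtime_variants :=
    if can_be_powered block_type then
      runtime_variants.foldl (fun acc variant =>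
        let base := if PySem.Str.endswith variant "]" then PySem.Str.slice variant none (some (-1)) else variant
        acc ++ [base ++ ",powered=true]", base ++ ",powered=false]"]) []
    else runtime_variants
  let runtime_variants :=
    if can_be_waterlogged block_type then
      runtime_variants.foldl (fun acc variant =>
        let base := if PySem.Str.endswith variant "]" then PySem.Str.slice variant none (some (-1)) else variant
        acc ++ [base ++ ",waterlogged=true]", base ++ ",waterlogged=false]"]) []
    else runtime_variants
  runtime_variants

-- ===== PORT B =====
-- _bool_combos n : itertools.product([True, False], repeat=n) order
def grvBoolCombos : Nat → List (List Bool)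
  | 0 => [[]]
  | n + 1 => [true, false].flatMap (fun b => (grvBoolCombos n).map (fun rest => b :: rest))

def get_runtime_variants_alt (block_type : String) (block : String) : List String :=
  let props : List String :=
    (if can_be_powered block_type then ["powered"] else []) ++
    (if can_be_waterlogged block_type then ["waterlogged"] else [])
  if props = [] then [block]
  else
    let base := if PySem.Str.endswith block "]" then PySem.Str.slice block none (some (-1)) else block
    (grvBoolCombos props.length).map (fun combo =>
      base ++ PySem.Str.join ""
        ((props.zip combo).map (fun pv => "," ++ pv.1 ++ "=" ++ (if pv.2 then "true" else "false"))) ++ "]")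

-- ===== PRECONDITION & SPEC =====
def Spec_get_runtime_variants (block_type : String) (block : String) (out : List String) : Prop := out = get_runtime_variants_alt block_type block
instance (block_type : String) (block : String) (out : List String) : Decidable (Spec_get_runtime_variants block_type block out) := by unfold Spec_get_runtime_variants; infer_instance

-- ===== CLAIM (what is proved, stated in full; the proofs are below) =====
def Claim_equal_get_runtime_variants : Prop := ∀ (block_type : String) (block : String), Dom_get_runtime_variants block_type block → Spec_get_runtime_variants block_type block (get_runtime_variants block_type block)

-- ===== LEMMAS AND PROOFS =====
theorem grv_ew (s t : String) (h : ("]".toList : List Char) <:+ t.toList) :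
    PySem.Str.endswith (s ++ t) "]" = true := by
  simp only [PySem.Str.endswith_eq, PySem.Chars.endswith_iff, String.toList_append]
  exact h.trans (List.suffix_append _ _)

theorem grv_sl (s t u : String) (hne : t.toList ≠ []) (h : t.toList.dropLast = u.toList) :
    PySem.Str.slice (s ++ t) none (some (-1)) = s ++ u := by
  apply String.toList_injective
  rw [PySem.Str.slice_to_neg_one, String.toList_append, String.toList_append,
    List.dropLast_append_of_ne_nil hne, h]

theorem grv_app3 (s : String) (t u v : String) (h : t ++ u = v) : s ++ t ++ u = s ++ v := by
  subst h; apply String.toList_injective; simp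

theorem grv_join_close (s : String) (l : List String) (v : String)
    (h : PySem.Str.join "" l ++ "]" = v) : s ++ PySem.Str.join "" l ++ "]" = s ++ v := by
  subst h; apply String.toList_injective; simp

-- ===== VERDICT (by name: the statement is the Claim_ definition above) =====
theorem get_runtime_variants_spec : Claim_equal_get_runtime_variants := by
  intro block_type block _
  unfold Spec_get_runtime_variants get_runtime_variants get_runtime_variants_alt
  cases hp : can_be_powered block_type <;> cases hw : can_be_waterlogged block_type
  · simp
  · simp only [Bool.false_eq_true, if_false, if_true, List.foldl, List.nil_append]
    rw [if_neg (show ¬(["waterlogged"] : List String) = [] by decide)]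
    simp only [grvBoolCombos, List.flatMap, List.map, List.length, List.zip_cons_cons,
      List.zip_nil_right, List.flatten, List.append_nil, List.cons_append, List.nil_append, List.append_eq]
    rw [grv_join_close _ _ ",waterlogged=true]" (by decide),
      grv_join_close _ _ ",waterlogged=false]" (by decide)]
  · simp only [Bool.false_eq_true, if_false, if_true, List.foldl, List.nil_append, List.append_nil]
    rw [if_neg (show ¬(["powered"] : List String) = [] by decide)]
    simp only [grvBoolCombos, List.flatMap, List.map, List.length, List.zip_cons_cons,
      List.zip_nil_right, List.flatten, List.append_nil, List.cons_append, List.nil_append, List.append_eq]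
    rw [grv_join_close _ _ ",powered=true]" (by decide),
      grv_join_close _ _ ",powered=false]" (by decide)]
  · simp only [if_true, List.foldl, List.nil_append]
    rw [grv_ew _ ",powered=true]" (by decide), grv_ew _ ",powered=false]" (by decide),
      grv_sl _ ",powered=true]" ",powered=true" (by decide) (by decide),
      grv_sl _ ",powered=false]" ",powered=false" (by decide) (by decide)]
    simp only [reduceIte, List.cons_append, List.nil_append]
    rw [if_neg (show ¬(["powered", "waterlogged"] : List String) = [] by decide)]
    simp only [grvBoolCombos, List.flatMap, List.map, List.length, List.zip_cons_cons,
      List.zip_nil_right, List.flatten, List.append_nil, List.cons_append, List.nil_append, List.append_eq]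
    rw [grv_join_close _ _ ",powered=true,waterlogged=true]" (by decide),
      grv_join_close _ _ ",powered=true,waterlogged=false]" (by decide),
      grv_join_close _ _ ",powered=false,waterlogged=true]" (by decide),
      grv_join_close _ _ ",powered=false,waterlogged=false]" (by decide)]
    rw [grv_app3 _ ",powered=true" ",waterlogged=true]" ",powered=true,waterlogged=true]" (by decide),
      grv_app3 _ ",powered=true" ",waterlogged=false]" ",powered=true,waterlogged=false]" (by decide),
      grv_app3 _ ",powered=false" ",waterlogged=true]" ",powered=false,waterlogged=true]" (by decide),
      grv_app3 _ ",powered=false" ",waterlogged=false]" ",powered=false,waterlogged=false]" (by decide)]
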